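-- pv_equiv track=rewrite | github.com/pypi-data/pypi-mirror-209 | packages/filecabinet/filecabinet-2.0.0-py3-none-any.whl/filecabinet/utils.py | readable_code
-- ===== SOURCE A (Python) =====
-- def readable_code(code, sep=' '):
--     groupsize = 2
--     for gs in [4, 3, 5]:
--         if len(code) % gs == 0:
--             groupsize = gs
--             break
--
--     result = ''
--     for idx, c in enumerate(code):
--         if idx > 0 and idx % groupsize == 0:
--             result += sep
--         result += c
--     return result
-- ===== SOURCE B (Python) =====
-- def readable_code(code, sep=' '):
--     n = len(code)
--     if n % 4 == 0:
--         groupsize = 4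
--     elif n % 3 == 0:
--         groupsize = 3
--     elif n % 5 == 0:
--         groupsize = 5
--     else:
--         groupsize = 2
--     chunks = []
--     while code:
--         chunks.append(code[:groupsize])
--         code = code[groupsize:]
--     return sep.join(chunks)
-- ===== Notes on version B (the rewrite author's own statement) =====
-- stated objective: idiomatic
-- what changed: A's for-loop over candidate group sizes becomes an if/elif chain, and the per-character loop with an index/modulo separator test becomes a while loop that repeatedly splits off a fixed-width head chunk and finally joins the chunks with sep.
import Mathlib
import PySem

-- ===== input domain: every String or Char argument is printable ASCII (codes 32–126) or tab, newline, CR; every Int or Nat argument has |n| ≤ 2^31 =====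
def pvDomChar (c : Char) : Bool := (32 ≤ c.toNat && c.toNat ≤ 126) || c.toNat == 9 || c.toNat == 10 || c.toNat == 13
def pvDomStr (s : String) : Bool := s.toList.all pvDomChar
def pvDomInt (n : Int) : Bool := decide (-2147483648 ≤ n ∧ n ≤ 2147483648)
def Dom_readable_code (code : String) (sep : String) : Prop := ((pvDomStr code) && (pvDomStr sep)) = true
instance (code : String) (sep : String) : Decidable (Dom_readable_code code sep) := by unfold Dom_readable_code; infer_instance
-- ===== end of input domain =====

-- B replaces A's per-character loop (index/modulo separator test) by a while loop that splits
-- off fixed-width head chunks and joins them with sep, and the groupsize for-loop by an if/elif chain.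

-- ===== PORT A =====
-- 'groupsize = 2; for gs in [4,3,5]: if len(code) % gs == 0: groupsize = gs; break'
def pvPickA (n : Int) : List Int → Int
  | [] => 2
  | gs :: rest => if PySem.Int.mod n gs = 0 then gs else pvPickA n rest

def readable_code (code : String) (sep : String) : String :=
  let groupsize := pvPickA (PySem.Str.len code) [4, 3, 5]
  String.ofList ((PySem.List.enumerate code.toList).foldl
    (fun result p =>
      let result := if 0 < p.1 ∧ PySem.Int.mod p.1 groupsize = 0 then result ++ sep.toList else result
      result ++ [p.2]) [])

-- ===== PORT B =====
-- 'if n % 4 == 0: groupsize = 4 elif n % 3 == 0: … elif n % 5 == 0: … else: 2'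
def pvGroupsizeB (n : Nat) : Nat :=
  if n % 4 = 0 then 4 else if n % 3 = 0 then 3 else if n % 5 = 0 then 5 else 2

-- the 'while code: chunks.append(code[:g]); code = code[g:]' loop; for g ≥ 1 (always here)
-- 'code[:g]' of c::cs is c :: cs.take (g-1) and 'code[g:]' is cs.drop (g-1) — exact, written
-- this way so the recursion is visibly decreasing
def pvChunksB (g : Nat) : List Char → List (List Char)
  | [] => []
  | c :: cs => (c :: cs.take (g - 1)) :: pvChunksB g (cs.drop (g - 1))
termination_by cs => cs.length
decreasing_by simp [List.length_drop]

def readable_code_alt (code : String) (sep : String) : String :=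
  let n := code.toList.length
  let groupsize := pvGroupsizeB n
  String.ofList (PySem.Chars.join sep.toList (pvChunksB groupsize code.toList))

-- ===== PRECONDITION & SPEC =====
def Spec_readable_code (code : String) (sep : String) (out : String) : Prop := out = readable_code_alt code sep
instance (code : String) (sep : String) (out : String) : Decidable (Spec_readable_code code sep out) := by unfold Spec_readable_code; infer_instance

-- ===== CLAIM (what is proved, stated in full; the proofs are below) =====
def Claim_equal_readable_code : Prop := ∀ (code : String) (sep : String), Dom_readable_code code sep → Spec_readable_code code sep (readable_code code sep)

-- ===== LEMMAS AND PROOFS =====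

-- A's groupsize loop agrees with B's if/elif chain (on the nonnegative length)
theorem pick_eq (n : Nat) : pvPickA (n : Int) [4, 3, 5] = ((pvGroupsizeB n : Nat) : Int) := by
  have h4 : (PySem.Int.mod (n : Int) 4 = 0) ↔ (n % 4 = 0) := by
    rw [PySem.Int.mod_eq_zero_iff_dvd]; omega
  have h3 : (PySem.Int.mod (n : Int) 3 = 0) ↔ (n % 3 = 0) := by
    rw [PySem.Int.mod_eq_zero_iff_dvd]; omega
  have h5 : (PySem.Int.mod (n : Int) 5 = 0) ↔ (n % 5 = 0) := by
    rw [PySem.Int.mod_eq_zero_iff_dvd]; omega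
  simp only [pvPickA, pvGroupsizeB, h4, h3, h5]
  split_ifs <;> norm_num

theorem pvGroupsizeB_pos (n : Nat) : 0 < pvGroupsizeB n := by
  rw [pvGroupsizeB]; split_ifs <;> omega

theorem pvChunksB_nil (g : Nat) : pvChunksB g [] = [] := pvChunksB.eq_1 g

theorem pvChunksB_cons (g : Nat) (hg : 0 < g) (c : Char) (cs : List Char) :
    pvChunksB g (c :: cs) = (c :: cs).take g :: pvChunksB g ((c :: cs).drop g) := by
  obtain ⟨g', rfl⟩ : ∃ g', g = g' + 1 := ⟨g - 1, by omega⟩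
  rw [pvChunksB.eq_2]
  simp

-- A's loop body, named for the proofs
def stepA (sepL : List Char) (g : Int) (result : List Char) (p : Int × Char) : List Char :=
  (if 0 < p.1 ∧ PySem.Int.mod p.1 g = 0 then result ++ sepL else result) ++ [p.2]

-- within a chunk, past its first character, the separator test never fires
theorem foldA_inner (sepL : List Char) (g : Int) (_hg : 0 < g) :
    ∀ (ch : List Char) (j : Int) (m : Int) (acc : List Char), g ∣ m → 0 < j → j + (ch.length : Int) ≤ g →
    (PySem.List.enumerate ch (m + j)).foldl (stepA sepL g) acc = acc ++ ch := by
  intro ch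
  induction ch with
  | nil => intro j m acc _ _ _; simp [PySem.List.enumerate]
  | cons c ch' ih =>
    intro j m acc hdvd hj hle
    rw [PySem.List.enumerate_cons, List.foldl_cons]
    have hcond : ¬ (0 < m + j ∧ PySem.Int.mod (m + j) g = 0) := by
      rintro ⟨-, hmod⟩
      rw [PySem.Int.mod_eq_zero_iff_dvd] at hmod
      have hjdvd : g ∣ j := (Int.dvd_add_right hdvd).mp hmod
      have := Int.le_of_dvd hj hjdvd
      simp at hle
      omega
    rw [stepA, if_neg hcond]
    have := ih (j + 1) m (acc ++ [c]) hdvd (by omega) (by simp at hle ⊢; omega)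
    rw [show m + j + 1 = m + (j + 1) by ring, this]
    simp

-- one whole chunk: a separator iff we are not at the very start
theorem foldA_chunk (sepL : List Char) (g : Int) (hg : 0 < g) (ch : List Char) (m : Int)
    (acc : List Char) (hne : ch ≠ []) (hle : (ch.length : Int) ≤ g) (_hm : 0 ≤ m) (hdvd : g ∣ m) :
    (PySem.List.enumerate ch m).foldl (stepA sepL g) acc
      = (if 0 < m then acc ++ sepL else acc) ++ ch := by
  match ch with
  | c :: ch' =>
    rw [PySem.List.enumerate_cons, List.foldl_cons]
    have hmod : PySem.Int.mod m g = 0 := (PySem.Int.mod_eq_zero_iff_dvd m g).mpr hdvd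
    rw [stepA]
    simp only [hmod, and_true]
    have := foldA_inner sepL g hg ch' 1 m
      ((if 0 < m then acc ++ sepL else acc) ++ [c]) hdvd (by omega)
      (by simp at hle ⊢; omega)
    rw [this]
    simp

-- the whole loop equals the join of the chunks
theorem foldA_main (sepL : List Char) (g : Int) (hg : 0 < g) :
    ∀ (n : Nat) (cs : List Char) (m : Int) (acc : List Char), cs.length ≤ n → 0 ≤ m → g ∣ m →
    (PySem.List.enumerate cs m).foldl (stepA sepL g) acc
      = acc ++ (if cs = [] ∨ m = 0 then [] else sepL) ++ PySem.Chars.join sepL (pvChunksB g.toNat cs) := by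
  intro n
  induction n with
  | zero =>
    intro cs m acc hlen _ _
    obtain rfl : cs = [] := List.eq_nil_of_length_eq_zero (by omega)
    simp [PySem.List.enumerate, pvChunksB_nil, PySem.Chars.join, List.intercalate]
  | succ n ih =>
    intro cs m acc hlen hm hdvd
    match cs with
    | [] => simp [PySem.List.enumerate, pvChunksB_nil, PySem.Chars.join, List.intercalate]
    | c :: cs' =>
      have hgnat : ((g.toNat : Int)) = g := Int.toNat_of_nonneg (by omega)
      have hgpos : 0 < g.toNat := by omega
      set ch := (c :: cs').take g.toNat with hch
      set rest := (c :: cs').drop g.toNat with hrest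
      have hsplit : c :: cs' = ch ++ rest := (List.take_append_drop _ _).symm
      rw [pvChunksB_cons g.toNat hgpos, ← hch, ← hrest]
      conv_lhs => rw [hsplit, PySem.List.enumerate_append, List.foldl_append]
      have hchne : ch ≠ [] := by simp [hch]; omega
      have hchlen : (ch.length : Int) ≤ g := by
        rw [hch]; simp; omega
      rw [foldA_chunk sepL g hg ch m acc hchne hchlen hm hdvd]
      by_cases hr : rest = []
      · rw [hr]
        simp only [PySem.List.enumerate, List.foldl_nil, pvChunksB_nil]
        have hj : PySem.Chars.join sepL [ch] = ch := by
          simp [PySem.Chars.join, List.intercalate]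
        rw [hj]
        by_cases h0 : m = 0
        · rw [h0]; simp
        · rw [if_pos (show 0 < m by omega), if_neg (show ¬(c :: cs' = [] ∨ m = 0) by simp [h0])]
      · have hlt : g.toNat < (c :: cs').length := by
          by_contra hcon
          exact hr (hrest.trans (List.drop_eq_nil_of_le (by omega)))
        have hchg : ch.length = g.toNat := by
          rw [hch, List.length_take]
          exact Nat.min_eq_left (Nat.le_of_lt hlt)
        have hm' : (0:Int) < m + ch.length := by
          have : (0:Int) < (ch.length : Int) := by rw [hchg]; exact_mod_cast hgpos
          omega
        have hrlen : rest.length ≤ n := by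
          rw [hrest]
          simp at hlen ⊢
          omega
        rw [ih rest (m + ch.length) _ hrlen (by omega)
            (by rw [hchg, hgnat]; exact Dvd.dvd.add hdvd (dvd_refl g))]
        rw [if_neg (show ¬(rest = [] ∨ m + (ch.length : Int) = 0) by rintro (h | h); exacts [hr h, by omega])]
        obtain ⟨r, rs, hr2⟩ : ∃ r rs, rest = r :: rs := by
          cases hx : rest with
          | nil => exact absurd hx hr
          | cons r rs => exact ⟨r, rs, rfl⟩
        obtain ⟨q, qs, hcl⟩ : ∃ q qs, pvChunksB g.toNat rest = q :: qs := by
          rw [hr2, pvChunksB_cons g.toNat hgpos]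
          exact ⟨_, _, rfl⟩
        rw [hcl, PySem.Chars.join_cons_cons]
        by_cases h0 : m = 0
        · rw [h0]
          simp only [lt_irrefl, if_false, List.cons_ne_nil, false_or]
          simp [List.append_assoc]
        · rw [if_pos (show 0 < m by omega), if_neg (show ¬(c :: cs' = [] ∨ m = 0) by simp [h0])]
          simp [List.append_assoc]

-- ===== VERDICT (by name: the statement is the Claim_ definition above) =====
theorem readable_code_spec : Claim_equal_readable_code := by
  unfold Claim_equal_readable_code Spec_readable_code
  intro code sep _
  rw [readable_code, readable_code_alt]
  have hlen : PySem.Str.len code = ((code.toList.length : Nat) : Int) := by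
    rw [PySem.Str.len_eq]
  rw [hlen, pick_eq]
  set gN := pvGroupsizeB code.toList.length with hgdef
  have hgN : 0 < gN := pvGroupsizeB_pos _
  have hg : (0:Int) < (gN : Int) := by exact_mod_cast hgN
  have hA := foldA_main sep.toList (gN : Int) hg code.toList.length code.toList 0 []
    (le_refl _) (le_refl 0) (dvd_zero _)
  have hstep : (fun (result : List Char) (p : Int × Char) =>
      let result := if 0 < p.1 ∧ PySem.Int.mod p.1 ((gN : Int)) = 0 then result ++ sep.toList else result
      result ++ [p.2]) = stepA sep.toList (gN : Int) := rfl
  rw [hstep, hA]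
  simp
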